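-- pv_equiv track=rewrite | github.com/ccgd-profile/BreaKmer | breakmer/utils.py | get_overlap_index
-- ===== SOURCE A (Python) =====
-- def get_overlap_index(a,b):
--     i = 0
--     nmismatch = 10
--     while nmismatch > 1:
--         nmismatch = 0
--         for aa,bb in zip(a[i:],b[:len(a[i:])]):
--             if aa != bb: nmismatch += 1
--         i += 1
-- #  while a[i:] != b[:len(a[i:])]:
-- #    i += 1
--     return i-1
-- ===== SOURCE B (Python) =====
-- def get_overlap_index(a, b):
--     # Different algorithm: instead of testing candidate shifts one by one
--     # (re-scanning a[i:] against b for every i), build the whole table of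
--     # per-diagonal mismatch counts in a single row-wise sweep over index
--     # pairs (j, k) -- the pair (j, k) lies on diagonal/shift j - k -- and
--     # then return the first diagonal whose count is at most 1.
--     la, lb = len(a), len(b)
--     mism = [0] * (la + 1)
--     for j in range(la):
--         c = a[j]
--         for k in range(min(j + 1, lb)):
--             if c != b[k]:
--                 mism[j - k] += 1
--     for i, m in enumerate(mism):
--         if m <= 1:
--             return i
-- ===== Notes on version B (the rewrite author's own statement) =====
-- stated objective: alternative
-- what changed: Replaces A's shift-by-shift search (recount mismatches of a[i:] vs b for each candidate i) with a single row-wise sweep over all index pairs (j,k) that builds the full table of per-diagonal mismatch counts, followed by a linear scan for the first diagonal with at most one mismatch.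
import Mathlib
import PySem

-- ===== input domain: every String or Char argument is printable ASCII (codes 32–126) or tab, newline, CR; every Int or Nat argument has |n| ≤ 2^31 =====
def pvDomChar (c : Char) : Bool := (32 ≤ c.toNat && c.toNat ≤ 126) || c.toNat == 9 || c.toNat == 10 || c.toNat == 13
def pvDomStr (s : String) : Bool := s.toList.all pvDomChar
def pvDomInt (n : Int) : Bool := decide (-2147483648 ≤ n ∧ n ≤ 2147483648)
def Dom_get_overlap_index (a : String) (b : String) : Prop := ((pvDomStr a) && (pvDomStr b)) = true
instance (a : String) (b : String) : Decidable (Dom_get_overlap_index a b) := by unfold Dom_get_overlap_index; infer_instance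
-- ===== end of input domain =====

-- B builds the per-diagonal mismatch-count table in one row-wise sweep over
-- index pairs and scans it for the first shift with ≤ 1 mismatches, instead of
-- A's per-shift recount loop (objective: alternative algorithm, same cost).

-- ===== PORT A =====
-- mismatch count of zip(a[i:], b[:len(a[i:])]) accumulated left to right, as in A's for-loop
def pvMismCount (xs ys : List Char) : Nat :=
  (xs.zip ys).foldl (fun n p => if p.1 ≠ p.2 then n + 1 else n) 0

-- if i ≥ xs.length the slice is empty, so the counted nmismatch is 0
theorem pvMismCount_drop_le_one (xs ys : List Char) (i : Nat) (h : xs.length ≤ i) :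
    pvMismCount (xs.drop i) ((ys.take (xs.drop i).length)) ≤ 1 := by
  simp [List.drop_eq_nil_of_le h, pvMismCount]

-- A's while loop: since nmismatch starts at 10 > 1 the body always runs once;
-- each pass counts the mismatches at shift i and increments i, exiting when
-- the count is ≤ 1; the returned value is the incremented i (A then subtracts 1).
def pvLoopA (a b : List Char) (i : Nat) : Nat :=
  if pvMismCount (a.drop i) (b.take (a.drop i).length) > 1 then pvLoopA a b (i + 1)
  else i + 1
termination_by a.length - i
decreasing_by
  have hi : i < a.length := by
    by_contra h
    exact absurd (pvMismCount_drop_le_one a b i (le_of_not_gt h)) (by omega)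
  omega

def get_overlap_index (a : String) (b : String) : Int :=
  (pvLoopA a.toList b.toList 0 : Int) - 1

-- ===== PORT B =====
-- mism[j - k] += 1
def pvBump (t : List Nat) (i : Nat) : List Nat := t.set i (t.getD i 0 + 1)

-- the inner loop of Source B's sweep: row j, k over range(min(j+1, len(b)))
def pvInner (a b : List Char) (j : Nat) (t : List Nat) : List Nat :=
  (List.range (min (j + 1) b.length)).foldl
    (fun t k => if a.getD j ' ' ≠ b.getD k ' ' then pvBump t (j - k) else t) t

-- the outer loop: j over range(len(a)), starting from [0] * (la + 1)
def pvTable (a b : List Char) : List Nat :=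
  (List.range a.length).foldl (fun t j => pvInner a b j t)
    (List.replicate (a.length + 1) 0)

-- the final scan: for i, m in enumerate(mism): if m <= 1: return i
def pvScan : List Nat → Nat → Nat
  | [], i => i
  | m :: ms, i => if m ≤ 1 then i else pvScan ms (i + 1)

def get_overlap_index_alt (a : String) (b : String) : Int :=
  (pvScan (pvTable a.toList b.toList) 0 : Int)

-- ===== PRECONDITION & SPEC =====
def Spec_get_overlap_index (a : String) (b : String) (out : Int) : Prop := out = get_overlap_index_alt a b
instance (a : String) (b : String) (out : Int) : Decidable (Spec_get_overlap_index a b out) := by unfold Spec_get_overlap_index; infer_instance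

-- ===== CLAIM (what is proved, stated in full; the proofs are below) =====
def Claim_equal_get_overlap_index : Prop := ∀ (a : String) (b : String), Dom_get_overlap_index a b → Spec_get_overlap_index a b (get_overlap_index a b)

-- ===== LEMMAS AND PROOFS =====

-- reference mismatch count
def pvM : List Char → List Char → Nat
  | [], _ => 0
  | _, [] => 0
  | x :: xs, y :: ys => (if x ≠ y then 1 else 0) + pvM xs ys

theorem pvMismCount_foldl (xs ys : List Char) (n : Nat) :
    (xs.zip ys).foldl (fun n p => if p.1 ≠ p.2 then n + 1 else n) n = n + pvM xs ys := by
  induction xs generalizing ys n with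
  | nil => simp [pvM]
  | cons x xs ih =>
    cases ys with
    | nil => simp [pvM]
    | cons y ys =>
      simp only [List.zip_cons_cons, List.foldl_cons, pvM, ih]
      split_ifs <;> omega

theorem pvMismCount_eq (xs ys : List Char) : pvMismCount xs ys = pvM xs ys := by
  simpa [pvMismCount] using pvMismCount_foldl xs ys 0

-- truncating ys to xs.length does not change the mismatch count
theorem pvM_take (xs ys : List Char) : pvM xs (ys.take xs.length) = pvM xs ys := by
  induction xs generalizing ys with
  | nil => simp [pvM]
  | cons x xs ih =>
    cases ys with
    | nil => simp [pvM]
    | cons y ys => simp [pvM, ih]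

theorem pvM_drop_zero (xs ys : List Char) (i : Nat) (h : xs.length ≤ i) :
    pvM (xs.drop i) ys = 0 := by
  simp [List.drop_eq_nil_of_le h, pvM]

-- the first shift with at most one mismatch (reference form of both results)
def pvFirst (a b : List Char) (i : Nat) : Nat :=
  if pvM (a.drop i) b ≤ 1 then i else pvFirst a b (i + 1)
termination_by a.length - i
decreasing_by
  have hi : i < a.length := by
    by_contra h
    simp_all [pvM_drop_zero a b i (le_of_not_gt h)]
  omega

-- A's loop returns pvFirst + 1
theorem pvLoopA_eq (a b : List Char) (i : Nat) : pvLoopA a b i = pvFirst a b i + 1 := by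
  generalize hfuel : a.length - i = n
  induction n generalizing i with
  | zero =>
    have h : a.length ≤ i := by omega
    have h0 := pvM_drop_zero a b i h
    rw [pvLoopA, pvFirst, if_neg (by rw [pvMismCount_eq, pvM_take]; omega),
      if_pos (by omega)]
  | succ n ih =>
    rw [pvLoopA, pvFirst, pvMismCount_eq, pvM_take]
    by_cases hc : pvM (a.drop i) b ≤ 1
    · rw [if_neg (by omega), if_pos hc]
    · have hi : i < a.length := by
        by_contra h
        exact hc (by simp [pvM_drop_zero a b i (le_of_not_gt h)])
      rw [if_pos (by omega), if_neg hc]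
      exact ih (i + 1) (by omega)

-- length is preserved by the sweep
theorem pvBump_length (t : List Nat) (i : Nat) : (pvBump t i).length = t.length := by
  simp [pvBump]

theorem pvFold_length (a b : List Char) (j : Nat) (ks : List Nat) (t : List Nat) :
    ((ks.foldl (fun t k => if a.getD j ' ' ≠ b.getD k ' ' then pvBump t (j - k) else t) t).length)
      = t.length := by
  induction ks generalizing t with
  | nil => rfl
  | cons k ks ih =>
    simp only [List.foldl_cons]
    rw [ih]
    split_ifs <;> simp [pvBump_length]

theorem pvInner_length (a b : List Char) (j : Nat) (t : List Nat) :
    (pvInner a b j t).length = t.length := pvFold_length a b j _ t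

theorem pvFoldRows_length (a b : List Char) (js : List Nat) (t : List Nat) :
    (js.foldl (fun t j => pvInner a b j t) t).length = t.length := by
  induction js generalizing t with
  | nil => rfl
  | cons j js ih => simp only [List.foldl_cons]; rw [ih, pvInner_length]

theorem pvTable_length (a b : List Char) : (pvTable a b).length = a.length + 1 := by
  unfold pvTable; rw [pvFoldRows_length]; simp

-- getD after a bump
theorem getD_pvBump (t : List Nat) (m i : Nat) :
    (pvBump t m).getD i 0 = t.getD i 0 + (if i = m ∧ m < t.length then 1 else 0) := by
  unfold pvBump
  by_cases hm : m < t.length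
  · by_cases he : i = m
    · subst he; simp [List.getD_eq_getElem?_getD, hm]
    · simp [List.getD_eq_getElem?_getD, he, Ne.symm he]
  · rw [List.set_eq_of_length_le (by omega)]
    simp [hm]

-- the inner fold adds the row-j indicator to diagonal i
theorem pvInnerAux (a b : List Char) (j i : Nat) (t : List Nat) (hj : j < t.length) :
    ∀ m, m ≤ j + 1 →
    ((List.range m).foldl (fun t k => if a.getD j ' ' ≠ b.getD k ' ' then pvBump t (j - k) else t) t).getD i 0
      = t.getD i 0 + (if i ≤ j ∧ j - i < m ∧ a.getD j ' ' ≠ b.getD (j - i) ' ' then 1 else 0) := by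
  intro m
  induction m with
  | zero => intro _; simp
  | succ m ih =>
    intro hm
    have hmj : m ≤ j := by omega
    have ihm := ih (by omega)
    rw [List.range_succ, List.foldl_append, List.foldl_cons, List.foldl_nil]
    have hTlen := pvFold_length a b j (List.range m) t
    by_cases hc : a.getD j ' ' ≠ b.getD m ' '
    · rw [if_pos hc, getD_pvBump, ihm, hTlen]
      by_cases hij : i ≤ j
      · by_cases him : i = j - m
        · have hji : j - i = m := by omega
          have e1 : (if i = j - m ∧ j - m < t.length then (1:Nat) else 0) = 1 :=
            if_pos ⟨him, by omega⟩
          have e2 : (if i ≤ j ∧ j - i < m ∧ a.getD j ' ' ≠ b.getD (j - i) ' ' then (1:Nat) else 0) = 0 :=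
            if_neg (fun h => absurd h.2.1 (by omega))
          have e3 : (if i ≤ j ∧ j - i < m + 1 ∧ a.getD j ' ' ≠ b.getD (j - i) ' ' then (1:Nat) else 0) = 1 :=
            if_pos ⟨hij, by omega, by rw [hji]; exact hc⟩
          rw [e1, e2, e3]
        · have hji : j - i ≠ m := by omega
          have e1 : (if i = j - m ∧ j - m < t.length then (1:Nat) else 0) = 0 :=
            if_neg (fun h => him h.1)
          have e2 : (if i ≤ j ∧ j - i < m + 1 ∧ a.getD j ' ' ≠ b.getD (j - i) ' ' then (1:Nat) else 0)
              = (if i ≤ j ∧ j - i < m ∧ a.getD j ' ' ≠ b.getD (j - i) ' ' then (1:Nat) else 0) :=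
            if_congr ⟨fun h => ⟨h.1, by omega, h.2.2⟩, fun h => ⟨h.1, by omega, h.2.2⟩⟩ rfl rfl
          rw [e1, e2]
          omega
      · have e1 : (if i = j - m ∧ j - m < t.length then (1:Nat) else 0) = 0 :=
          if_neg (fun h => hij (by omega))
        have e2 : (if i ≤ j ∧ j - i < m ∧ a.getD j ' ' ≠ b.getD (j - i) ' ' then (1:Nat) else 0) = 0 :=
          if_neg (fun h => hij h.1)
        have e3 : (if i ≤ j ∧ j - i < m + 1 ∧ a.getD j ' ' ≠ b.getD (j - i) ' ' then (1:Nat) else 0) = 0 :=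
          if_neg (fun h => hij h.1)
        rw [e1, e2, e3]
    · rw [if_neg hc, ihm]
      simp only [ne_eq, not_not] at hc
      have hiff : (i ≤ j ∧ j - i < m + 1 ∧ a.getD j ' ' ≠ b.getD (j - i) ' ')
          ↔ (i ≤ j ∧ j - i < m ∧ a.getD j ' ' ≠ b.getD (j - i) ' ') := by
        constructor
        · rintro ⟨h1, h2, h3⟩
          refine ⟨h1, ?_, h3⟩
          rcases Nat.lt_succ_iff_lt_or_eq.mp h2 with h | h
          · exact h
          · exact absurd (h ▸ hc) h3
        · rintro ⟨h1, h2, h3⟩; exact ⟨h1, by omega, h3⟩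
      rw [if_congr hiff rfl rfl]

theorem pvInner_getD (a b : List Char) (j i : Nat) (t : List Nat) (hj : j < t.length) :
    (pvInner a b j t).getD i 0
      = t.getD i 0 + (if i ≤ j ∧ j - i < min (j + 1) b.length ∧ a.getD j ' ' ≠ b.getD (j - i) ' ' then 1 else 0) := by
  exact pvInnerAux a b j i t hj _ (Nat.min_le_left _ _)

-- appending one row to the matched region
theorem pvM_snoc (zs : List Char) (x : Char) (ys : List Char) :
    pvM (zs ++ [x]) ys
      = pvM zs ys + (if zs.length < ys.length ∧ x ≠ ys.getD zs.length ' ' then 1 else 0) := by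
  induction zs generalizing ys with
  | nil =>
    cases ys with
    | nil => simp [pvM]
    | cons y ys => simp [pvM]
  | cons z zs ih =>
    cases ys with
    | nil => simp [pvM]
    | cons y ys => simp [pvM, ih]; split_ifs <;> omega

-- after processing rows j < n, diagonal i holds the mismatch count of (a.take n)[i:] against b
theorem pvTableAux (a b : List Char) :
    ∀ n, n ≤ a.length → ∀ i,
    ((List.range n).foldl (fun t j => pvInner a b j t) (List.replicate (a.length + 1) 0)).getD i 0
      = pvM ((a.take n).drop i) b := by
  intro n
  induction n with
  | zero => intro _ i; simp [pvM]
  | succ n ih =>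
    intro hn i
    have hna : n < a.length := by omega
    rw [List.range_succ, List.foldl_append, List.foldl_cons, List.foldl_nil]
    have hlen : ((List.range n).foldl (fun t j => pvInner a b j t)
        (List.replicate (a.length + 1) 0)).length = a.length + 1 := by
      rw [pvFoldRows_length]; simp
    rw [pvInner_getD a b n i _ (by omega), ih (by omega) i]
    have htake : a.take (n + 1) = a.take n ++ [a[n]] := by
      rw [List.take_add_one]
      simp [List.getElem?_eq_getElem hna]
    by_cases hin : i ≤ n
    · have hdrop : (a.take (n + 1)).drop i = (a.take n).drop i ++ [a[n]] := by
        rw [htake, List.drop_append_of_le_length (by simp; omega)]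
      rw [hdrop, pvM_snoc]
      have hlen2 : ((a.take n).drop i).length = n - i := by simp; omega
      have hiff : ((a.take n).drop i).length < b.length ∧ a[n] ≠ b.getD ((a.take n).drop i).length ' '
          ↔ (i ≤ n ∧ n - i < min (n + 1) b.length ∧ a.getD n ' ' ≠ b.getD (n - i) ' ') := by
        rw [hlen2, List.getD_eq_getElem _ _ hna]
        constructor
        · rintro ⟨h1, h2⟩; exact ⟨hin, by omega, h2⟩
        · rintro ⟨_, h1, h2⟩; exact ⟨by omega, h2⟩
      rw [if_congr hiff rfl rfl]
    · have h1 : (a.take (n + 1)).drop i = [] := List.drop_eq_nil_of_le (by simp; omega)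
      have h2 : (a.take n).drop i = [] := List.drop_eq_nil_of_le (by simp; omega)
      rw [h1, h2, if_neg (fun h => hin h.1)]
      simp [pvM]

-- the table entry at diagonal i is the mismatch count of a[i:] against b
theorem pvTable_getD (a b : List Char) (i : Nat) :
    (pvTable a b).getD i 0 = pvM (a.drop i) b := by
  have h := pvTableAux a b a.length (le_refl _) i
  rw [List.take_length] at h
  unfold pvTable
  exact h

-- the scan of the table suffix from i is pvFirst
theorem pvScan_eq (a b : List Char) (i : Nat) (hi : i ≤ a.length) :
    pvScan ((pvTable a b).drop i) i = pvFirst a b i := by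
  generalize hfuel : a.length - i = n
  induction n generalizing i with
  | zero =>
    have hie : i = a.length := by omega
    have hlt : i < (pvTable a b).length := by rw [pvTable_length]; omega
    have hdrop : (pvTable a b).drop i = (pvTable a b)[i]'hlt :: (pvTable a b).drop (i + 1) :=
      List.drop_eq_getElem_cons hlt
    have hv : (pvTable a b)[i]'hlt = pvM (a.drop i) b := by
      rw [← List.getD_eq_getElem _ 0 hlt, pvTable_getD]
    have h0 : pvM (a.drop i) b = 0 := pvM_drop_zero a b i (by omega)
    rw [hdrop, pvScan, pvFirst, hv, h0, if_pos (by omega), if_pos (by omega)]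
  | succ n ih =>
    have hlt : i < (pvTable a b).length := by rw [pvTable_length]; omega
    have hdrop : (pvTable a b).drop i = (pvTable a b)[i]'hlt :: (pvTable a b).drop (i + 1) :=
      List.drop_eq_getElem_cons hlt
    have hv : (pvTable a b)[i]'hlt = pvM (a.drop i) b := by
      rw [← List.getD_eq_getElem _ 0 hlt, pvTable_getD]
    rw [hdrop, pvScan, pvFirst, hv]
    by_cases hc : pvM (a.drop i) b ≤ 1
    · rw [if_pos hc, if_pos hc]
    · rw [if_neg hc, if_neg hc]
      exact ih (i + 1) (by omega) (by omega)

-- ===== VERDICT (by name: the statement is the Claim_ definition above) =====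
theorem get_overlap_index_spec : Claim_equal_get_overlap_index := by
  intro a b _
  unfold Spec_get_overlap_index get_overlap_index get_overlap_index_alt
  rw [pvLoopA_eq]
  have := pvScan_eq a.toList b.toList 0 (by omega)
  simp only [List.drop_zero] at this
  rw [this]
  push_cast
  ring
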